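-- pv_equiv track=rewrite | github.com/zerotrustprivacy/machine-learning | healthcare_pipeline.py | process
-- ===== SOURCE A (Python) =====
-- def process(element):
--     # Assuming element is a single line from a CSV
--     # Parse the CSV line
--     values = element.split(',') # Basic split, use csv module for robustness
--     # Example basic cleaning/transformation (replace with your actual logic)
--     processed_values = []
--     for i, value in enumerate(values):
--         if i == 0: # Example: Convert first column to integer
--             processed_values.append(value)
--         elif i == 2: # Example: Handle missing in third column
--              processed_values.append(value if value else 'Unknown')
--         else:
--             processed_values.append(value)
--     # Return the processed data, perhaps as a comma-separated string or a dictionary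
--     yield ','.join(map(str, processed_values))
-- ===== SOURCE B (Python) =====
-- def process(element):
--     values = element.split(',')
--     if len(values) > 2 and values[2] == '':
--         values[2] = 'Unknown'
--     yield ','.join(values)
-- ===== Notes on version B (the rewrite author's own statement) =====
-- stated objective: simpler
-- what changed: Replaced the enumerate loop that rebuilds every field into a new list with a single guarded in-place assignment to index 2 followed by the join.
import Mathlib
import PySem

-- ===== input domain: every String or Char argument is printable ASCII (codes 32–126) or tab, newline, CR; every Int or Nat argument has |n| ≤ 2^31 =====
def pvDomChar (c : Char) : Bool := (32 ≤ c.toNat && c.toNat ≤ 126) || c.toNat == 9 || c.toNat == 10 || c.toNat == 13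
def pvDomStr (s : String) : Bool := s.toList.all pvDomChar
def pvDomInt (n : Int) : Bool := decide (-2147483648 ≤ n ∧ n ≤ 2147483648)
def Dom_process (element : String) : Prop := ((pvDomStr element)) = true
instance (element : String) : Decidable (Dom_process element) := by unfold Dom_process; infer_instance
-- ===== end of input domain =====

-- B replaces A's per-field enumerate-and-rebuild loop with one guarded index assignment (simpler).

-- ===== PORT A =====
-- the loop body: for i, value in enumerate(values): … append …
def processStep (acc : List String) (p : Int × String) : List String :=
  if p.1 == 0 then acc ++ [p.2]
  else if p.1 == 2 then acc ++ [if p.2 == "" then "Unknown" else p.2]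
  else acc ++ [p.2]

def process (element : String) : List String :=
  let values := ((PySem.Str.split? element ",").getD [])
  let processed := (PySem.List.enumerate values 0).foldl processStep []
  [PySem.Str.join "," processed]

-- ===== PORT B =====
def process_alt (element : String) : List String :=
  let values := ((PySem.Str.split? element ",").getD [])
  let values :=
    if values.length > 2 && (PySem.List.pyGetD values 2 "") == "" then values.set 2 "Unknown"
    else values
  [PySem.Str.join "," values]

-- ===== PRECONDITION & SPEC =====
def Spec_process (element : String) (out : List String) : Prop := out = process_alt element
instance (element : String) (out : List String) : Decidable (Spec_process element out) := by unfold Spec_process; infer_instance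

-- ===== CLAIM (what is proved, stated in full; the proofs are below) =====
def Claim_equal_process : Prop := ∀ (element : String), Dom_process element → Spec_process element (process element)

-- ===== LEMMAS AND PROOFS =====

-- the tail of the loop (indices ≥ 3) copies elements unchanged
lemma processStep_tail (rest : List String) : ∀ (k : Int) (acc : List String), 3 ≤ k →
    (PySem.List.enumerate rest k).foldl processStep acc = acc ++ rest := by
  induction rest with
  | nil => intro k acc _; simp [PySem.List.enumerate_nil]
  | cons x xs ih =>
    intro k acc hk
    rw [PySem.List.enumerate_cons, List.foldl_cons]
    have h0 : (k == 0) = false := by simp; omega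
    have h2 : (k == 2) = false := by simp; omega
    rw [processStep, h0, h2]
    simp only [Bool.false_eq_true, if_false]
    rw [ih (k+1) _ (by omega)]
    simp

lemma processed_eq (values : List String) :
    (PySem.List.enumerate values 0).foldl processStep [] =
      (if values.length > 2 && (PySem.List.pyGetD values 2 "") == "" then values.set 2 "Unknown"
       else values) := by
  match values with
  | [] => simp [PySem.List.enumerate_nil]
  | [a] => simp [PySem.List.enumerate_cons, PySem.List.enumerate_nil, processStep, PySem.List.pyGetD]
  | [a, b] => simp [PySem.List.enumerate_cons, PySem.List.enumerate_nil, processStep, PySem.List.pyGetD]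
  | a :: b :: c :: rest =>
    rw [PySem.List.enumerate_cons, PySem.List.enumerate_cons, PySem.List.enumerate_cons]
    simp only [List.foldl_cons]
    rw [show (0+1+1+1 : Int) = 3 by norm_num, processStep_tail rest 3 _ le_rfl]
    have hget : PySem.List.pyGetD (a :: b :: c :: rest) 2 "" = c := by
      have h : (2:Int) ≤ (rest.length:Int) + 1 + 1 := by omega
      simp [PySem.List.pyGetD, PySem.List.pyGet?, PySem.List.pyIdx?, h]
    by_cases hc : c = ""
    · subst hc; simp [processStep, hget]
    · simp [processStep, hget, hc]

-- ===== VERDICT (by name: the statement is the Claim_ definition above) =====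
theorem process_spec : Claim_equal_process := by
  intro element _
  show _ = _
  simp only [process, process_alt]
  rw [processed_eq]
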